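-- pv_equiv track=rewrite | github.com/sammcf/hermes-overseer | src/overseer/response/state_restore.py | audit_restore_plan
-- ===== SOURCE A (Python) =====
-- _CLASSIFICATIONS: dict[str, str] = {
--     "state.db": "safe",
--     "SOUL.md": "audit",
--     ".env": "skip",
--     "config.yaml": "canonical",
-- }
--
-- _AUDIT_PATTERNS = ("memories/",)
--
-- def classify_file_for_restore(file_path: str) -> str:
--     """Classify a file path into a restore category.
--
--     Categories:
--     - "safe"      — state.db: can be restored automatically
--     - "audit"     — memories/, SOUL.md: requires human review before restore
--     - "canonical" — config.yaml: restore from canonical source only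
--     - "skip"      — .env: never restore automatically
--     - "unknown"   — anything else
--
--     Matching is done on the basename and known path prefixes.
--     """
--     basename = file_path.split("/")[-1]
--
--     if basename in _CLASSIFICATIONS:
--         return _CLASSIFICATIONS[basename]
--
--     for pattern in _AUDIT_PATTERNS:
--         if pattern in file_path:
--             return "audit"
--
--     return "unknown"
--
-- def audit_restore_plan(files: list[str]) -> dict[str, list[str]]:
--     """Group files by their restore classification.
--
--     Returns a dict with keys: "safe", "audit", "canonical", "skip", "unknown".
--     Each value is a (possibly empty) list of file paths in that category.
--     """
--     plan: dict[str, list[str]] = {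
--         "safe": [],
--         "audit": [],
--         "canonical": [],
--         "skip": [],
--         "unknown": [],
--     }
--     for f in files:
--         category = classify_file_for_restore(f)
--         plan[category].append(f)
--     return plan
-- ===== SOURCE B (Python) =====
-- _CATEGORIES = ["safe", "audit", "canonical", "skip", "unknown"]
--
-- def _classify(path):
--     base = path.split("/")[-1]
--     if base == "state.db":
--         return "safe"
--     if base == "SOUL.md":
--         return "audit"
--     if base == ".env":
--         return "skip"
--     if base == "config.yaml":
--         return "canonical"
--     if "memories/" in path:
--         return "audit"
--     return "unknown"
--
-- def audit_restore_plan(files):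
--     return {cat: [f for f in files if _classify(f) == cat] for cat in _CATEGORIES}
-- ===== Notes on version B (the rewrite author's own statement) =====
-- stated objective: alternative
-- what changed: B builds the plan by iterating over the five fixed category names and filtering the file list once per category (and classifies with an early-return if-chain instead of a dict lookup plus pattern loop), instead of A's single accumulation pass that appends each file into a pre-built dict of empty lists.
import Mathlib
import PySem

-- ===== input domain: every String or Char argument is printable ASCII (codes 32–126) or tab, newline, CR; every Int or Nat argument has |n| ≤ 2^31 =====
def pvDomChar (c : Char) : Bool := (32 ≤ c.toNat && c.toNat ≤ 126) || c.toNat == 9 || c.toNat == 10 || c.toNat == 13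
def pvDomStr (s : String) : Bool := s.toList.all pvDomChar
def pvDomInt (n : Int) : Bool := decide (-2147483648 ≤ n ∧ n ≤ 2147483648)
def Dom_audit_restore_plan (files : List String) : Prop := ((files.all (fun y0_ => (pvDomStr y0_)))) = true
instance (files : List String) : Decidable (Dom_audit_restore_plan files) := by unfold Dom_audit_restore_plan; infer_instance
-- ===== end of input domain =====

-- B groups by looping over the five fixed category names, filtering the file list once
-- per category, instead of A's single accumulation pass into a pre-built dict; same values.

-- ===== PORT A =====
def pvClassifications : PySem.Dict String String :=
  PySem.Dict.ofList [("state.db", "safe"), ("SOUL.md", "audit"), (".env", "skip"), ("config.yaml", "canonical")]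

def pvAuditPatterns : List String := ["memories/"]

-- the 'for pattern in _AUDIT_PATTERNS' loop of classify_file_for_restore
def pvAuditLoop (file_path : String) : List String → String
  | [] => "unknown"
  | p :: ps => if PySem.Str.isIn p file_path then "audit" else pvAuditLoop file_path ps

def classify_file_for_restore (file_path : String) : String :=
  let basename := PySem.List.pyGetD ((PySem.Str.split? file_path "/").getD []) (-1) ""
  if pvClassifications.contains basename then
    -- key is present, so the default of getD is never used (d[basename])
    pvClassifications.getD basename ""
  else
    pvAuditLoop file_path pvAuditPatterns

def audit_restore_plan (files : List String) : List (String × List String) :=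
  let plan : PySem.Dict String (List String) :=
    PySem.Dict.ofList [("safe", []), ("audit", []), ("canonical", []), ("skip", []), ("unknown", [])]
  (files.foldl (fun d f => d.modify (classify_file_for_restore f) [] (fun l => l ++ [f])) plan).items

-- ===== PORT B =====
def pvCategories : List String := ["safe", "audit", "canonical", "skip", "unknown"]

def pvClassifyB (path : String) : String :=
  let base := PySem.List.pyGetD ((PySem.Str.split? path "/").getD []) (-1) ""
  if base == "state.db" then "safe"
  else if base == "SOUL.md" then "audit"
  else if base == ".env" then "skip"
  else if base == "config.yaml" then "canonical"
  else if PySem.Str.isIn "memories/" path then "audit"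
  else "unknown"

def audit_restore_plan_alt (files : List String) : List (String × List String) :=
  pvCategories.map (fun cat => (cat, files.filter (fun f => pvClassifyB f == cat)))

-- ===== PRECONDITION & SPEC =====
def Spec_audit_restore_plan (files : List String) (out : List (String × List String)) : Prop := out = audit_restore_plan_alt files
instance (files : List String) (out : List (String × List String)) : Decidable (Spec_audit_restore_plan files out) := by unfold Spec_audit_restore_plan; infer_instance

-- ===== CLAIM (what is proved, stated in full; the proofs are below) =====
def Claim_equal_audit_restore_plan : Prop := ∀ (files : List String), Dom_audit_restore_plan files → Spec_audit_restore_plan files (audit_restore_plan files)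

-- ===== LEMMAS AND PROOFS =====

lemma classify_eq (fp : String) : classify_file_for_restore fp = pvClassifyB fp := by
  unfold classify_file_for_restore pvClassifyB pvAuditLoop pvAuditPatterns
  have hd : pvClassifications = PySem.Dict.mk [("state.db", "safe"), ("SOUL.md", "audit"),
      (".env", "skip"), ("config.yaml", "canonical")] := by decide
  rw [hd]
  generalize (PySem.List.pyGetD ((PySem.Str.split? fp "/").getD []) (-1) "") = base
  by_cases h1 : base = "state.db" <;> by_cases h2 : base = "SOUL.md" <;> by_cases h3 : base = ".env" <;>
    by_cases h4 : base = "config.yaml" <;>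
    simp_all [PySem.Dict.contains_mk, PySem.Dict.getD, PySem.Dict.get?] <;>
    first
      | rfl
      | (rw [if_neg (by rintro (h | h | h | h) <;> simp_all)]; simp [pvAuditLoop])

lemma classify_cases (fp : String) :
    pvClassifyB fp = "safe" ∨ pvClassifyB fp = "audit" ∨ pvClassifyB fp = "canonical" ∨
      pvClassifyB fp = "skip" ∨ pvClassifyB fp = "unknown" := by
  unfold pvClassifyB
  generalize (PySem.List.pyGetD ((PySem.Str.split? fp "/").getD []) (-1) "") = base
  by_cases h1 : base = "state.db" <;> by_cases h2 : base = "SOUL.md" <;> by_cases h3 : base = ".env" <;>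
    by_cases h4 : base = "config.yaml" <;> by_cases h5 : PySem.Str.isIn "memories/" fp = true <;>
    simp_all

lemma step_eq (a b c s u : List String) (f : String) :
    (PySem.Dict.mk [("safe", a), ("audit", b), ("canonical", c), ("skip", s), ("unknown", u)]).modify
        (classify_file_for_restore f) [] (fun l => l ++ [f])
    = PySem.Dict.mk [("safe", a ++ if pvClassifyB f == "safe" then [f] else []),
        ("audit", b ++ if pvClassifyB f == "audit" then [f] else []),
        ("canonical", c ++ if pvClassifyB f == "canonical" then [f] else []),
        ("skip", s ++ if pvClassifyB f == "skip" then [f] else []),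
        ("unknown", u ++ if pvClassifyB f == "unknown" then [f] else [])] := by
  rw [classify_eq]
  rcases classify_cases f with h | h | h | h | h <;>
    simp [h, PySem.Dict.modify, PySem.Dict.insert, PySem.Dict.getD, PySem.Dict.get?, PySem.Dict.contains]

lemma fold_items (fs : List String) (a b c s u : List String) :
    (fs.foldl (fun d f => d.modify (classify_file_for_restore f) [] (fun l => l ++ [f]))
      (PySem.Dict.mk [("safe", a), ("audit", b), ("canonical", c), ("skip", s), ("unknown", u)])).items
    = [("safe", a ++ fs.filter (fun f => pvClassifyB f == "safe")),
       ("audit", b ++ fs.filter (fun f => pvClassifyB f == "audit")),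
       ("canonical", c ++ fs.filter (fun f => pvClassifyB f == "canonical")),
       ("skip", s ++ fs.filter (fun f => pvClassifyB f == "skip")),
       ("unknown", u ++ fs.filter (fun f => pvClassifyB f == "unknown"))] := by
  induction fs generalizing a b c s u with
  | nil => simp
  | cons f fs ih =>
    rw [List.foldl_cons, step_eq, ih]
    simp only [List.filter_cons]
    split_ifs <;> simp_all

-- ===== VERDICT (by name: the statement is the Claim_ definition above) =====
theorem audit_restore_plan_spec : Claim_equal_audit_restore_plan := by
  intro files _
  unfold Spec_audit_restore_plan audit_restore_plan audit_restore_plan_alt pvCategories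
  have hp : PySem.Dict.ofList [("safe", ([] : List String)), ("audit", []), ("canonical", []),
      ("skip", []), ("unknown", [])] = PySem.Dict.mk [("safe", []), ("audit", []), ("canonical", []),
      ("skip", []), ("unknown", [])] := by decide
  rw [hp, fold_items]
  simp
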